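-- pv_equiv track=rewrite | github.com/manhitv/codesignal | CompanyChallenges/Jet.py | packageBoxing
-- ===== SOURCE A (Python) =====
-- def packageBoxing(pkg, boxes):
--
--     import math
--     pkg, min_v, index = sorted(pkg), math.inf, 0
--     for i in range(len(boxes)):
--         if all(m <= n for m, n in zip(pkg, sorted(boxes[i]))):
--             a = boxes[i][0]*boxes[i][1]*boxes[i][2]
--             if min_v > a:
--                 min_v = a
--                 index = i
--     return index if min_v != math.inf else -1
-- ===== SOURCE B (Python) =====
-- def packageBoxing(pkg, boxes):
--     spkg = sorted(pkg)
--
--     def fits(b):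
--         return all(m <= n for m, n in zip(spkg, sorted(b)))
--
--     cands = [(b[0] * b[1] * b[2], i) for i, b in enumerate(boxes) if fits(b)]
--     cands.sort(key=lambda t: t[0])
--     return cands[0][1] if cands else -1
-- ===== Notes on version B (the rewrite author's own statement) =====
-- stated objective: alternative
-- what changed: B builds the list of (volume, original-index) pairs for the boxes that fit, stably sorts it by volume and returns the first pair's index, replacing A's single-pass running-minimum scan with running min_v/index state.
import Mathlib
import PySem

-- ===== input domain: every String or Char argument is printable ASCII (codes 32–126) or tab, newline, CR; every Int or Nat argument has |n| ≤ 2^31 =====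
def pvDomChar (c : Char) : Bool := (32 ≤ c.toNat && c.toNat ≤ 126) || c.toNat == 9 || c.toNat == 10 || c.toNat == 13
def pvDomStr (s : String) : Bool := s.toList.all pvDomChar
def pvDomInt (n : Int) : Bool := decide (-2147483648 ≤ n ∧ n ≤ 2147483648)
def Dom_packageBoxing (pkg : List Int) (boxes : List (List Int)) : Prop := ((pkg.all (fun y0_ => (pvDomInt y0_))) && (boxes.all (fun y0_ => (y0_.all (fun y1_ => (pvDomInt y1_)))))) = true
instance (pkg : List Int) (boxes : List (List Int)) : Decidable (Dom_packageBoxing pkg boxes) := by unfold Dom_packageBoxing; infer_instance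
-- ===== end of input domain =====

-- B replaces A's running-minimum index scan by: collect (volume, index) candidates for the fitting
-- boxes, stably sort them by volume, return the first candidate's index (alternative decomposition).


-- ===== PORT A =====
-- literal port of A: sort pkg, loop i over range(len(boxes)) keeping (min_v : Option Int = math.inf, index);
-- boxes[i][0]*boxes[i][1]*boxes[i][2] is ported with pyGetD _ _ 0 — exact whenever the box has ≥ 3 entries,
-- which Pre_ guarantees for every box reaching that line (Python raises IndexError there otherwise).
def packageBoxing (pkg : List Int) (boxes : List (List Int)) : Int :=
  let spkg := PySem.List.sorted pkg (fun x => x) false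
  let st := (PySem.List.pyRange 0 (boxes.length : Int) 1).foldl
    (fun (s : Option Int × Int) i =>
      let b := PySem.List.pyGetD boxes i []
      if (spkg.zip (PySem.List.sorted b (fun x => x) false)).all (fun p => decide (p.1 ≤ p.2)) then
        let a := PySem.List.pyGetD b 0 0 * PySem.List.pyGetD b 1 0 * PySem.List.pyGetD b 2 0
        if (match s.1 with | none => true | some v => decide (a < v)) then (some a, i) else s
      else s)
    ((none : Option Int), (0 : Int))
  match st.1 with
  | some _ => st.2
  | none => -1

-- ===== PORT B =====
def pvFits (spkg b : List Int) : Bool :=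
  (spkg.zip (PySem.List.sorted b (fun x => x) false)).all (fun p => decide (p.1 ≤ p.2))

def packageBoxing_alt (pkg : List Int) (boxes : List (List Int)) : Int :=
  let spkg := PySem.List.sorted pkg (fun x => x) false
  let cands := (PySem.List.enumerate boxes).filterMap
    (fun p => if pvFits spkg p.2 then
        some (PySem.List.pyGetD p.2 0 0 * PySem.List.pyGetD p.2 1 0 * PySem.List.pyGetD p.2 2 0, p.1)
      else none)
  match (PySem.List.sorted cands (fun t => t.1) false).head? with
  | some t => t.2
  | none => -1

-- ===== PRECONDITION & SPEC =====
-- Python A raises IndexError exactly when some box with fewer than 3 entries passes the fit test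
-- (zip truncates, so e.g. the empty box always "fits"); Pre_ excludes exactly those inputs (B raises there too).
def Pre_packageBoxing (pkg : List Int) (boxes : List (List Int)) : Prop :=
  ∀ b ∈ boxes,
    ((PySem.List.sorted pkg (fun x => x) false).zip (PySem.List.sorted b (fun x => x) false)).all
      (fun p => decide (p.1 ≤ p.2)) = true → 3 ≤ b.length
instance (pkg : List Int) (boxes : List (List Int)) : Decidable (Pre_packageBoxing pkg boxes) := by
  unfold Pre_packageBoxing; infer_instance
def pvWitness_packageBoxing : List Int × List (List Int) := ([1, 2, 3], [[3, 4, 5], [1, 1, 1]])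

def Spec_packageBoxing (pkg : List Int) (boxes : List (List Int)) (out : Int) : Prop := out = packageBoxing_alt pkg boxes
instance (pkg : List Int) (boxes : List (List Int)) (out : Int) : Decidable (Spec_packageBoxing pkg boxes out) := by unfold Spec_packageBoxing; infer_instance

-- ===== CLAIM (what is proved, stated in full; the proofs are below) =====
def Claim_equal_packageBoxing : Prop := ∀ (pkg : List Int) (boxes : List (List Int)), Dom_packageBoxing pkg boxes → Pre_packageBoxing pkg boxes → Spec_packageBoxing pkg boxes (packageBoxing pkg boxes)

-- ===== LEMMAS AND PROOFS =====

-- the "best so far" step of an optional running minimum on (volume, index) pairs, first minimum kept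
def pvStepO (o : Option (Int × Int)) (x : Int × Int) : Option (Int × Int) :=
  match o with
  | none => some x
  | some y => if x.1 < y.1 then some x else some y

-- A's accumulator (min_v, index); pvConv maps the optional-pair view onto it
def pvConv (o : Option (Int × Int)) : Option Int × Int :=
  match o with
  | none => ((none : Option Int), (0 : Int))
  | some y => (some y.1, y.2)

-- the candidate list both programs can be reformulated over
def pvCands (pkg : List Int) (boxes : List (List Int)) : List (Int × Int) :=
  ((PySem.List.enumerate boxes).filter
      (fun p => pvFits (PySem.List.sorted pkg (fun x => x) false) p.2)).map
    (fun p => (PySem.List.pyGetD p.2 0 0 * PySem.List.pyGetD p.2 1 0 * PySem.List.pyGetD p.2 2 0, p.1))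

def pvBest (pkg : List Int) (boxes : List (List Int)) : Option (Int × Int) :=
  (pvCands pkg boxes).foldl pvStepO none

theorem pvHead_insertBy (key : (Int × Int) → Int) (x : Int × Int) (ys : List (Int × Int)) :
    (PySem.List.insertBy (fun a b => decide (key a < key b)) x ys).head? =
      some (match ys with | [] => x | y :: _ => if key x < key y then x else y) := by
  cases ys with
  | nil => rfl
  | cons y t =>
      simp only [PySem.List.insertBy]
      split_ifs with h <;> simp_all

theorem pvFoldl_insertBy_head (l : List (Int × Int)) (acc : List (Int × Int)) :
    (l.foldl (fun acc x => PySem.List.insertBy (fun a b => decide ((fun t => t.1) a < (fun t => t.1) b)) x acc) acc).head? =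
      l.foldl pvStepO acc.head? := by
  induction l generalizing acc with
  | nil => rfl
  | cons x t ih =>
      simp only [List.foldl_cons]
      rw [ih]
      congr 1
      rw [pvHead_insertBy (fun t => t.1) x acc]
      cases acc with
      | nil => rfl
      | cons y ys =>
          simp only [List.head?_cons, pvStepO]
          split_ifs <;> rfl

-- head of the stable sort by volume IS the first-minimum fold
theorem pvSorted_head (l : List (Int × Int)) :
    (PySem.List.sorted l (fun t => t.1) false).head? = l.foldl pvStepO none := by
  rw [PySem.List.sorted_eq_foldl_insertBy l (fun t => t.1)]
  exact pvFoldl_insertBy_head l []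

-- A's running (min_v, index) fold is pvConv of the first-minimum fold
theorem pvConv_fold (l : List (Int × Int)) (o : Option (Int × Int)) :
    l.foldl (fun s x => if (match s.1 with | none => true | some v => decide (x.1 < v)) then (some x.1, x.2) else s)
      (pvConv o) = pvConv (l.foldl pvStepO o) := by
  induction l generalizing o with
  | nil => rfl
  | cons x t ih =>
      simp only [List.foldl_cons]
      have h : (if (match (pvConv o).1 with | none => true | some v => decide (x.1 < v)) then (some x.1, x.2) else pvConv o)
          = pvConv (pvStepO o x) := by
        cases o with
        | none => rfl
        | some y =>
            simp only [pvConv, pvStepO]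
            split_ifs <;> simp_all
      rw [h, ih]

theorem pvFilterMap_eq (f : (Int × List Int) → Bool) (g : (Int × List Int) → (Int × Int)) (l : List (Int × List Int)) :
    l.filterMap (fun p => if f p then some (g p) else none) = (l.filter f).map g := by
  induction l with
  | nil => rfl
  | cons x t ih =>
      by_cases h : f x = true <;> simp [h, ih]

-- B as a computation on pvBest
theorem pvB_norm (pkg : List Int) (boxes : List (List Int)) :
    packageBoxing_alt pkg boxes = match pvBest pkg boxes with | some t => t.2 | none => -1 := by
  unfold pvBest pvCands
  show (match (PySem.List.sorted
      ((PySem.List.enumerate boxes).filterMap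
        (fun p => if pvFits (PySem.List.sorted pkg (fun x => x) false) p.2 then
            some (PySem.List.pyGetD p.2 0 0 * PySem.List.pyGetD p.2 1 0 * PySem.List.pyGetD p.2 2 0, p.1)
          else none))
      (fun t => t.1) false).head? with
    | some t => t.2
    | none => -1) = _
  rw [pvFilterMap_eq (fun p => pvFits (PySem.List.sorted pkg (fun x => x) false) p.2)
      (fun p => (PySem.List.pyGetD p.2 0 0 * PySem.List.pyGetD p.2 1 0 * PySem.List.pyGetD p.2 2 0, p.1))]
  rw [pvSorted_head]

-- A as a computation on pvBest
theorem pvA_norm (pkg : List Int) (boxes : List (List Int)) :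
    packageBoxing pkg boxes =
      match (pvConv (pvBest pkg boxes)).1 with
      | some _ => (pvConv (pvBest pkg boxes)).2
      | none => -1 := by
  have hst : (PySem.List.pyRange 0 (boxes.length : Int) 1).foldl
      (fun (s : Option Int × Int) i =>
        let b := PySem.List.pyGetD boxes i []
        if ((PySem.List.sorted pkg (fun x => x) false).zip (PySem.List.sorted b (fun x => x) false)).all (fun p => decide (p.1 ≤ p.2)) then
          let a := PySem.List.pyGetD b 0 0 * PySem.List.pyGetD b 1 0 * PySem.List.pyGetD b 2 0
          if (match s.1 with | none => true | some v => decide (a < v)) then (some a, i) else s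
        else s)
      ((none : Option Int), (0 : Int)) = pvConv (pvBest pkg boxes) := by
    have h1 : (PySem.List.enumerate boxes).foldl
        (fun (s : Option Int × Int) (p : Int × List Int) =>
          if pvFits (PySem.List.sorted pkg (fun x => x) false) p.2 then
            (if (match s.1 with
                  | none => true
                  | some v => decide (PySem.List.pyGetD p.2 0 0 * PySem.List.pyGetD p.2 1 0 * PySem.List.pyGetD p.2 2 0 < v)) then
              (some (PySem.List.pyGetD p.2 0 0 * PySem.List.pyGetD p.2 1 0 * PySem.List.pyGetD p.2 2 0), p.1)
            else s)
          else s)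
        ((none : Option Int), (0 : Int)) = pvConv (pvBest pkg boxes) := by
      rw [PySem.List.foldl_if_eq_foldl_filter
            (fun (p : Int × List Int) => pvFits (PySem.List.sorted pkg (fun x => x) false) p.2)]
      have h2 := pvConv_fold (pvCands pkg boxes) none
      unfold pvCands at h2
      rw [List.foldl_map] at h2
      exact h2
    have henum : PySem.List.enumerate boxes =
        (PySem.List.pyRange 0 (boxes.length : Int) 1).map (fun j => (j, PySem.List.pyGetD boxes j [])) := by
      rw [PySem.List.enumerate_eq_map_pyRange boxes []]
      simp [PySem.List.len_eq]
    rw [henum, List.foldl_map] at h1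
    exact h1
  show (match ((PySem.List.pyRange 0 (boxes.length : Int) 1).foldl
      (fun (s : Option Int × Int) i =>
        let b := PySem.List.pyGetD boxes i []
        if ((PySem.List.sorted pkg (fun x => x) false).zip (PySem.List.sorted b (fun x => x) false)).all (fun p => decide (p.1 ≤ p.2)) then
          let a := PySem.List.pyGetD b 0 0 * PySem.List.pyGetD b 1 0 * PySem.List.pyGetD b 2 0
          if (match s.1 with | none => true | some v => decide (a < v)) then (some a, i) else s
        else s)
      ((none : Option Int), (0 : Int))).1 with
    | some _ => _
    | none => -1) = _
  rw [hst]

-- ===== VERDICT (by name: the statement is the Claim_ definition above) =====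
theorem packageBoxing_spec : Claim_equal_packageBoxing := by
  intro pkg boxes _ _
  unfold Spec_packageBoxing
  rw [pvA_norm, pvB_norm]
  cases h : pvBest pkg boxes with
  | none => rfl
  | some t => rfl
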